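-- pv_equiv track=rewrite | github.com/EleqtronBree/PythonAssignments | COMPSCI 101 Python Assignment - Longest E Word.py | get_longest_e_word
-- ===== SOURCE A (Python) =====
-- def get_longest_e_word(words_list):
--     longest_word = ''
--     e_word_list = []
--     longest_word = ""
--     for word in words_list:
--         if len(word) > 5:
--             if 'E' in word or 'e' in word:
--                 e_word_list.append(word)
--     for word in e_word_list:
--         if (len(word) > len(longest_word)) or (len(word) == len(longest_word)):
--             longest_word = word
--     return longest_word
-- ===== SOURCE B (Python) =====
-- def get_longest_e_word(words_list):
--     candidates = [w for w in words_list if len(w) > 5 and ('E' in w or 'e' in w)]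
--     if not candidates:
--         return ''
--     return sorted(candidates, key=len)[-1]
-- ===== Notes on version B (the rewrite author's own statement) =====
-- stated objective: alternative
-- what changed: Replaces A's two accumulator loops (append-filter then last-max scan with a >=-update) by a list-comprehension filter plus a stable sort by length, returning the last element of the sorted list; stability makes sorted(...)[-1] the last word of maximal length, exactly A's tie-break.
import Mathlib
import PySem

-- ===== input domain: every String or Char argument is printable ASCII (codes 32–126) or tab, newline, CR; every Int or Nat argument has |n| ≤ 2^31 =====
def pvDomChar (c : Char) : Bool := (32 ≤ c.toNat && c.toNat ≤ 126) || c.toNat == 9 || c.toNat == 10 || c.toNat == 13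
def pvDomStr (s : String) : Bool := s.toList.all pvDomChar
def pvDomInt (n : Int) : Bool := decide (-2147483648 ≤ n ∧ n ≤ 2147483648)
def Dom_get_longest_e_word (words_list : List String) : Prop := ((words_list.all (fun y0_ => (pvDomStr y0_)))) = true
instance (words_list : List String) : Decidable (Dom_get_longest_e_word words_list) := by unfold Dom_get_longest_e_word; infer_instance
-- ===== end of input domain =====

-- B replaces A's two accumulator loops by a filter plus a stable sort by length, taking the last element; same cost class, different decomposition.


-- ===== PORT A =====
def get_longest_e_word (words_list : List String) : String :=
  let e_word_list := words_list.foldl (fun acc word =>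
    if PySem.Str.len word > 5 then
      if PySem.Str.isIn "E" word || PySem.Str.isIn "e" word then acc ++ [word] else acc
    else acc) []
  e_word_list.foldl (fun longest_word word =>
    if PySem.Str.len word > PySem.Str.len longest_word ∨ PySem.Str.len word = PySem.Str.len longest_word
    then word else longest_word) ""

-- ===== PORT B =====
def get_longest_e_word_alt (words_list : List String) : String :=
  let candidates := words_list.filter (fun w =>
    decide (PySem.Str.len w > 5) && (PySem.Str.isIn "E" w || PySem.Str.isIn "e" w))
  if candidates.isEmpty then ""
  else PySem.List.pyGetD (PySem.List.sorted candidates (fun w => PySem.Str.len w)) (-1) ""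

-- ===== PRECONDITION & SPEC =====
def Spec_get_longest_e_word (words_list : List String) (out : String) : Prop := out = get_longest_e_word_alt words_list
instance (words_list : List String) (out : String) : Decidable (Spec_get_longest_e_word words_list out) := by unfold Spec_get_longest_e_word; infer_instance

-- ===== CLAIM (what is proved, stated in full; the proofs are below) =====
def Claim_equal_get_longest_e_word : Prop := ∀ (words_list : List String), Dom_get_longest_e_word words_list → Spec_get_longest_e_word words_list (get_longest_e_word words_list)

-- ===== LEMMAS AND PROOFS =====

-- A's first loop builds exactly the filter B uses.
theorem pvStep (P : Prop) [Decidable P] (b : Bool) (acc : List String) (w : String) :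
    (if P then if b then acc ++ [w] else acc else acc)
    = if (decide P && b) then acc ++ [w] else acc := by
  by_cases h : P <;> cases b <;> simp [h]

theorem pvFoldFilter (ws acc : List String) :
    ws.foldl (fun acc word =>
      if PySem.Str.len word > 5 then
        if PySem.Str.isIn "E" word || PySem.Str.isIn "e" word then acc ++ [word] else acc
      else acc) acc
    = acc ++ ws.filter (fun w =>
        decide (PySem.Str.len w > 5) && (PySem.Str.isIn "E" w || PySem.Str.isIn "e" w)) := by
  induction ws generalizing acc with
  | nil => simp
  | cons w ws ih =>
    rw [List.foldl_cons, List.filter_cons]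
    show ws.foldl _ (if PySem.Str.len w > 5 then
        if PySem.Str.isIn "E" w || PySem.Str.isIn "e" w then acc ++ [w] else acc else acc) = _
    rw [pvStep]
    cases hc : (decide (PySem.Str.len w > 5) && (PySem.Str.isIn "E" w || PySem.Str.isIn "e" w))
    · rw [if_neg (by simp), if_neg (by simp), ih]
    · rw [if_pos rfl, if_pos rfl, ih, List.append_assoc, List.singleton_append]

theorem pvGetLastD (xs : List String) (d : String) :
    PySem.List.pyGetD xs (-1) d = xs.getLastD d := by
  cases hx : xs with
  | nil => simp [PySem.List.pyGetD, PySem.List.pyIdx?, PySem.List.pyGet?]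
  | cons x t =>
    rw [PySem.List.pyGetD_neg_one _ _ (by simp), List.getLastD_eq_getLast?,
        List.getLast?_eq_some_getLast (by simp), Option.getD_some]

theorem pvLenNonneg (s : String) : 0 ≤ PySem.Str.len s := by
  rw [PySem.Str.len_eq]; positivity

theorem pvLenEmpty : PySem.Str.len "" = 0 := by decide

theorem pvGetLastDCons (y : String) (t : List String) (d : String) :
    (y :: t).getLastD d = (y :: t).getLast (by simp) := by
  rw [List.getLastD_eq_getLast?, List.getLast?_eq_some_getLast (by simp), Option.getD_some]

-- in an ascending list, the head's key is at most the last element's key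
theorem pvHeadLeLast (y : String) (t : List String)
    (hp : (y :: t).Pairwise (fun a b => PySem.Str.len a ≤ PySem.Str.len b)) :
    PySem.Str.len y ≤ PySem.Str.len ((y :: t).getLast (by simp)) := by
  cases t with
  | nil => simp
  | cons z t' =>
    have hmem : (z :: t').getLast (by simp) ∈ z :: t' := List.getLast_mem _
    have h := (List.pairwise_cons.mp hp).1 _ hmem
    rw [List.getLast_cons (by simp)]
    exact h

-- last element after a stable insertion into an ascending list
theorem pvInsertLast (x : String) (ys : List String)
    (hp : ys.Pairwise (fun a b => PySem.Str.len a ≤ PySem.Str.len b)) :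
    (PySem.List.insertBy (fun a b => decide (PySem.Str.len a < PySem.Str.len b)) x ys).getLast?
    = some (if PySem.Str.len (ys.getLastD x) ≤ PySem.Str.len x then x
            else ys.getLastD x) := by
  induction ys with
  | nil =>
    rw [show PySem.List.insertBy (fun a b => decide (PySem.Str.len a < PySem.Str.len b)) x ([] : List String)
          = [x] from rfl, List.getLastD_nil, if_pos le_rfl]
    rfl
  | cons y t ih =>
    have hunf : PySem.List.insertBy (fun a b => decide (PySem.Str.len a < PySem.Str.len b)) x (y :: t)
        = if decide (PySem.Str.len x < PySem.Str.len y) = true then x :: y :: t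
          else y :: PySem.List.insertBy (fun a b => decide (PySem.Str.len a < PySem.Str.len b)) x t := by
      simp only [PySem.List.insertBy]
    cases hd : decide (PySem.Str.len x < PySem.Str.len y)
    · have hlt : ¬ PySem.Str.len x < PySem.Str.len y := of_decide_eq_false hd
      rw [hunf, hd, if_neg (by simp)]
      cases t with
      | nil =>
        rw [show PySem.List.insertBy (fun a b => decide (PySem.Str.len a < PySem.Str.len b)) x []
              = [x] from rfl]
        rw [pvGetLastDCons, List.getLast_singleton, if_pos (by omega)]
        rfl
      | cons z t' =>
        have ih' := ih (List.pairwise_cons.mp hp).2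
        obtain ⟨u, rest, hur⟩ : ∃ u rest,
            PySem.List.insertBy (fun a b => decide (PySem.Str.len a < PySem.Str.len b)) x (z :: t')
            = u :: rest := by
          rw [show PySem.List.insertBy (fun a b => decide (PySem.Str.len a < PySem.Str.len b)) x (z :: t')
                = if decide (PySem.Str.len x < PySem.Str.len z) = true then x :: z :: t'
                  else z :: PySem.List.insertBy (fun a b => decide (PySem.Str.len a < PySem.Str.len b)) x t' from
              by simp only [PySem.List.insertBy]]
          split
          · exact ⟨_, _, rfl⟩
          · exact ⟨_, _, rfl⟩
        rw [hur, List.getLast?_cons_cons, ← hur, ih', pvGetLastDCons z t' x,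
            pvGetLastDCons y (z :: t') x,
            List.getLast_cons (l := z :: t') (by simp)]
    · have hlt : PySem.Str.len x < PySem.Str.len y := of_decide_eq_true hd
      have hyle := pvHeadLeLast y t hp
      rw [hunf, hd, if_pos rfl, List.getLast?_cons_cons,
          List.getLast?_eq_some_getLast (l := y :: t) (by simp), pvGetLastDCons,
          if_neg (by omega)]

-- A's second loop computes the last element of the stable sort by length.
theorem pvFoldMax (c : List String) :
    c.foldl (fun longest_word word =>
      if PySem.Str.len word > PySem.Str.len longest_word ∨ PySem.Str.len word = PySem.Str.len longest_word
      then word else longest_word) ""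
    = (PySem.List.sorted c (fun w => PySem.Str.len w)).getLastD "" := by
  induction c using List.reverseRecOn with
  | nil => simp [PySem.List.sorted_eq_foldl_insertBy]
  | append_singleton c x ih =>
    have hsorted : PySem.List.sorted (c ++ [x]) (fun w => PySem.Str.len w)
        = PySem.List.insertBy (fun a b => decide (PySem.Str.len a < PySem.Str.len b)) x
            (PySem.List.sorted c (fun w => PySem.Str.len w)) := by
      rw [PySem.List.sorted_eq_foldl_insertBy, List.foldl_append, List.foldl_cons, List.foldl_nil,
          ← PySem.List.sorted_eq_foldl_insertBy]
    rw [List.foldl_append, List.foldl_cons, List.foldl_nil, ih, hsorted]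
    rw [show (PySem.List.insertBy (fun a b => decide (PySem.Str.len a < PySem.Str.len b)) x
            (PySem.List.sorted c (fun w => PySem.Str.len w))).getLastD ""
          = ((PySem.List.insertBy (fun a b => decide (PySem.Str.len a < PySem.Str.len b)) x
            (PySem.List.sorted c (fun w => PySem.Str.len w))).getLast?).getD "" from
        List.getLastD_eq_getLast?]
    rw [pvInsertLast x _ (PySem.List.sorted_pairwise c _), Option.getD_some]
    cases hs : PySem.List.sorted c (fun w => PySem.Str.len w) with
    | nil =>
      have hx := pvLenNonneg x
      have he := pvLenEmpty
      rw [List.getLastD_nil, List.getLastD_nil, if_pos le_rfl, if_pos (by omega)]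
    | cons z t =>
      rw [pvGetLastDCons z t "", pvGetLastDCons z t x]
      by_cases h : PySem.Str.len ((z :: t).getLast (by simp)) ≤ PySem.Str.len x
      · rw [if_pos h, if_pos (by omega)]
      · rw [if_neg h, if_neg (by omega)]

-- ===== VERDICT (by name: the statement is the Claim_ definition above) =====
theorem get_longest_e_word_spec : Claim_equal_get_longest_e_word := by
  intro ws _
  show _ = _
  unfold get_longest_e_word get_longest_e_word_alt
  simp only [pvFoldFilter ws [], List.nil_append, pvFoldMax, pvGetLastD]
  cases h : ws.filter (fun w =>
      decide (PySem.Str.len w > 5) && (PySem.Str.isIn "E" w || PySem.Str.isIn "e" w)) with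
  | nil => simp [PySem.List.sorted_eq_foldl_insertBy]
  | cons a t => simp [List.isEmpty_cons]
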